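-- pv_equiv track=rewrite | github.com/quantmew/yoga-layout-python | tests/generated/test_intrinsic_size_generated.py | _longest_word_width
-- ===== SOURCE A (Python) =====
-- def _longest_word_width(text, width_per_char):
--     max_length = 0
--     current_length = 0
--     for char in text:
--         if char == " ":
--             max_length = max(current_length, max_length)
--             current_length = 0
--         else:
--             current_length += 1
--     return max(current_length, max_length) * width_per_char
-- ===== SOURCE B (Python) =====
-- def _longest_word_width(text, width_per_char):
--     return max(len(w) for w in text.split(' ')) * width_per_char
-- ===== Notes on version B (the rewrite author's own statement) =====
-- stated objective: simpler
-- what changed: Replaces the manual character scan with running max/current counters by splitting the text on the single-space separator and taking the maximum segment length in one expression.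
import Mathlib
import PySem

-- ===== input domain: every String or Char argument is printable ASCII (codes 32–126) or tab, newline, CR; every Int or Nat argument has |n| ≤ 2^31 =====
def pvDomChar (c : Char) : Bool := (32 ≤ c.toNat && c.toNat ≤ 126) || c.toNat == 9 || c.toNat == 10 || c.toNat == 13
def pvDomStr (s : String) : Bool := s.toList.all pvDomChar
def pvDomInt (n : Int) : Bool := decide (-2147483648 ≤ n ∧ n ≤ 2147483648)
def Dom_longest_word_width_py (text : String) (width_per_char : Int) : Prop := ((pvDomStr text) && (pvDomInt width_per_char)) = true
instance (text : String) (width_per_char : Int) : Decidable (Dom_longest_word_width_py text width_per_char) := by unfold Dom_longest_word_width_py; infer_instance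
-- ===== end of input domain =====

-- B replaces A's manual running-max character scan by split-on-space + max of segment lengths (simpler decomposition, same cost).

-- ===== PORT A =====
-- state: (max_length, current_length)
def longest_word_width_py (text : String) (width_per_char : Int) : Int :=
  let st := text.toList.foldl
    (fun (st : Int × Int) c =>
      if c = ' ' then (max st.2 st.1, 0) else (st.1, st.2 + 1))
    (0, 0)
  max st.2 st.1 * width_per_char

-- ===== PORT B =====
-- text.split(' ') → PySem.Chars.splitOn (the sep ≠ "" form of str.split); len(w) → segment length.
-- Python's max over the segment lengths: PySem.List.max?; split(' ') is never empty, so .getD 0 is unreachable.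
def longest_word_width_py_alt (text : String) (width_per_char : Int) : Int :=
  ((PySem.List.max? ((PySem.Chars.splitOn text.toList [' ']).map
      (fun w => (w.length : Int))) (fun x => x)).getD 0) * width_per_char

-- ===== PRECONDITION & SPEC =====
def Spec_longest_word_width_py (text : String) (width_per_char : Int) (out : Int) : Prop := out = longest_word_width_py_alt text width_per_char
instance (text : String) (width_per_char : Int) (out : Int) : Decidable (Spec_longest_word_width_py text width_per_char out) := by unfold Spec_longest_word_width_py; infer_instance

-- ===== CLAIM (what is proved, stated in full; the proofs are below) =====
def Claim_equal_longest_word_width_py : Prop := ∀ (text : String) (width_per_char : Int), Dom_longest_word_width_py text width_per_char → Spec_longest_word_width_py text width_per_char (longest_word_width_py text width_per_char)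

-- ===== LEMMAS AND PROOFS =====

/-- Reference splitter on a single space, plain structural recursion (proof-only helper). -/
def pvSplit (pre : List Char) : List Char → List (List Char)
  | [] => [pre]
  | c :: rest => if c = ' ' then pre :: pvSplit [] rest else pvSplit (pre ++ [c]) rest

lemma pvSplit_nonempty (pre : List Char) (l : List Char) : ∃ h t, pvSplit pre l = h :: t := by
  induction l generalizing pre with
  | nil => exact ⟨pre, [], rfl⟩
  | cons c rest ih =>
    by_cases hc : c = ' '
    · exact ⟨pre, pvSplit [] rest, by simp [pvSplit, hc]⟩
    · obtain ⟨h, t, he⟩ := ih (pre ++ [c])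
      exact ⟨h, t, by simp [pvSplit, hc, he]⟩

lemma go_spec (l : List Char) : ∀ (fuel : Nat) (cur : List Char) (hacc : List (List Char)),
    l.length < fuel →
    PySem.Chars.splitOn.go [' '] fuel l cur hacc = hacc.reverse ++ pvSplit cur.reverse l := by
  induction l with
  | nil =>
    intro fuel cur hacc hf
    obtain ⟨n, rfl⟩ : ∃ n, fuel = n + 1 := ⟨fuel - 1, by omega⟩
    simp [PySem.Chars.splitOn.go, pvSplit]
  | cons c rest ih =>
    intro fuel cur hacc hf
    obtain ⟨n, rfl⟩ : ∃ n, fuel = n + 1 := ⟨fuel - 1, by omega⟩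
    simp only [List.length_cons] at hf
    by_cases hc : c = ' '
    · subst hc
      have hstep : PySem.Chars.splitOn.go [' '] (n+1) (' '::rest) cur hacc
          = PySem.Chars.splitOn.go [' '] n rest [] (cur.reverse :: hacc) := by
        simp [PySem.Chars.splitOn.go, List.isPrefixOf]
      rw [hstep, ih n [] (cur.reverse :: hacc) (by omega)]
      simp [pvSplit]
    · have hstep : PySem.Chars.splitOn.go [' '] (n+1) (c::rest) cur hacc
          = PySem.Chars.splitOn.go [' '] n rest (c::cur) hacc := by
        have hc' : ¬ (' ' = c) := fun h => hc h.symm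
        simp [PySem.Chars.splitOn.go, List.isPrefixOf, hc']
      rw [hstep, ih n (c::cur) hacc (by omega)]
      simp [pvSplit, hc]

lemma splitOn_eq_pvSplit (l : List Char) :
    PySem.Chars.splitOn l [' '] = pvSplit [] l := by
  have h := go_spec l (l.length + 1) [] [] (by omega)
  simpa [PySem.Chars.splitOn] using h

lemma scan_eq (l : List Char) : ∀ (pre : List Char) (m : Int),
    (fun st : Int × Int => max st.2 st.1)
      (l.foldl (fun (st : Int × Int) c =>
        if c = ' ' then (max st.2 st.1, 0) else (st.1, st.2 + 1)) (m, (pre.length : Int)))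
    = ((pvSplit pre l).map (fun w => (w.length : Int))).foldl max m := by
  induction l with
  | nil => intro pre m; simp [pvSplit, max_comm]
  | cons c rest ih =>
    intro pre m
    by_cases hc : c = ' '
    · have h0 := ih [] (max (pre.length : Int) m)
      simp only [List.foldl, hc, pvSplit] at *
      simpa [max_comm] using h0
    · have h := ih (pre ++ [c]) m
      simp only [List.foldl, pvSplit, hc, List.length_append] at *
      simpa [add_comm] using h

theorem longest_word_width_py_spec : Claim_equal_longest_word_width_py := by
  intro text width_per_char _
  unfold Spec_longest_word_width_py longest_word_width_py longest_word_width_py_alt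
  rw [splitOn_eq_pvSplit]
  obtain ⟨h, t, he⟩ := pvSplit_nonempty [] text.toList
  have hs := scan_eq text.toList [] 0
  simp only [List.length_nil, Int.ofNat_zero] at hs
  rw [he] at hs ⊢
  simp only [List.map_cons] at hs ⊢
  rw [PySem.List.max?_id_cons]
  simp only [List.foldl_cons] at hs
  have h0 : max (0 : Int) (h.length : Int) = (h.length : Int) := max_eq_right (by positivity)
  rw [h0] at hs
  simp only [Option.getD_some]
  rw [hs]
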